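-- pv_equiv track=rewrite | github.com/jihwankim255/Coding_Test | test.py | solution
-- ===== SOURCE A (Python) =====
-- def solution(s):
--     lst = []
--     for i in s:
--         while len(lst) > 0 and lst[-1] < i:
--             lst.pop()
--         lst.append(i)
--
--     answer = ''.join(lst)
--     return answer
-- ===== SOURCE B (Python) =====
-- def solution(s):
--     out = []
--     m = None
--     for c in reversed(s):
--         if m is None or c >= m:
--             out.append(c)
--             m = c
--     return ''.join(reversed(out))
-- ===== Notes on version B (the rewrite author's own statement) =====
-- stated objective: simpler
-- what changed: Replaces the monotonic stack with pops by a single reverse scan keeping a scalar running maximum (the stack survivors are exactly the right-to-left running maxima), eliminating all pop operations.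
import Mathlib
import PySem

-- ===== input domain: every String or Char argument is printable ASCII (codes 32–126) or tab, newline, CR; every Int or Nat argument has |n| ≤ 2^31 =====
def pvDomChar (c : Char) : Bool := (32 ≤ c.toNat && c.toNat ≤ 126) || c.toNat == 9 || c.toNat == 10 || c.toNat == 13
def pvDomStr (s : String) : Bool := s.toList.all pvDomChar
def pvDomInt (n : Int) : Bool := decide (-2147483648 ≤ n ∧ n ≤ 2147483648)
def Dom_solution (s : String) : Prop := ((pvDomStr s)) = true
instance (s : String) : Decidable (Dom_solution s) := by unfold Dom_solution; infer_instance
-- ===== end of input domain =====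

-- B replaces A's monotonic stack (pop while top < current) by a single reverse scan
-- keeping a scalar running maximum: simpler, no pops.

-- ===== PORT A =====
-- the inner 'while len(lst) > 0 and lst[-1] < i: lst.pop()' loop
def popSmaller (lst : List Char) (c : Char) : List Char :=
  match h : lst.getLast? with
  | none => lst
  | some y => if y < c then popSmaller lst.dropLast c else lst
termination_by lst.length
decreasing_by
  have hne : lst ≠ [] := by intro he; subst he; simp at h
  have hp : 0 < lst.length := List.length_pos_iff.mpr hne
  rw [List.length_dropLast]
  omega

def solution (s : String) : String :=
  String.mk (s.toList.foldl (fun lst c => popSmaller lst c ++ [c]) [])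

-- ===== PORT B =====
def solution_alt (s : String) : String :=
  let r := s.toList.reverse.foldl
    (fun (acc : List Char × Option Char) c =>
      match acc.2 with
      | none => (acc.1 ++ [c], some c)
      | some m => if m ≤ c then (acc.1 ++ [c], some c) else acc)
    ([], none)
  String.mk r.1.reverse

-- ===== PRECONDITION & SPEC =====
def Spec_solution (s : String) (out : String) : Prop := out = solution_alt s
instance (s : String) (out : String) : Decidable (Spec_solution s out) := by unfold Spec_solution; infer_instance

-- ===== CLAIM (what is proved, stated in full; the proofs are below) =====
def Claim_equal_solution : Prop := ∀ (s : String), Dom_solution s → Spec_solution s (solution s)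

-- ===== LEMMAS AND PROOFS =====

-- head-side version of popSmaller, acting on the reversed stack
def popS (lst : List Char) (c : Char) : List Char :=
  match lst with
  | [] => []
  | x :: t => if x < c then popS t c else x :: t

-- the common characterisation: survivors of the scan, left-to-right
def maxKeep (l : List Char) : List Char :=
  match l with
  | [] => []
  | c :: t =>
    match (maxKeep t).head? with
    | none => [c]
    | some m => if m ≤ c then c :: maxKeep t else maxKeep t

theorem popSmaller_concat (l : List Char) (x c : Char) :
    popSmaller (l ++ [x]) c = if x < c then popSmaller l c else l ++ [x] := by
  rw [popSmaller]
  split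
  · next heq => rw [List.getLast?_concat] at heq; exact absurd heq (by simp)
  · next y heq =>
      rw [List.getLast?_concat] at heq
      injection heq with heq
      subst heq
      rw [List.dropLast_concat]

theorem popSmaller_eq_popS (q : List Char) (c : Char) :
    popSmaller q c = (popS q.reverse c).reverse := by
  have key : ∀ (r : List Char), popSmaller r.reverse c = (popS r c).reverse := by
    intro r
    induction r with
    | nil => simp [popSmaller, popS]
    | cons x t ih =>
      rw [List.reverse_cons, popSmaller_concat]
      by_cases hx : x < c
      · rw [if_pos hx, ih, popS, if_pos hx]
      · rw [if_neg hx, popS, if_neg hx, List.reverse_cons]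
  have := key q.reverse
  simpa using this

theorem popS_popS (acc : List Char) (c c' : Char) (h : c ≤ c') :
    popS (popS acc c) c' = popS acc c' := by
  induction acc with
  | nil => simp [popS]
  | cons x t ih =>
    by_cases hx : x < c
    · rw [popS, if_pos hx, ih, popS, if_pos (lt_of_lt_of_le hx h)]
    · rw [popS, if_neg hx]

theorem maxKeep_head_cons (c : Char) (t : List Char) :
    ∃ m, (maxKeep (c :: t)).head? = some m := by
  rw [maxKeep]
  cases h : (maxKeep t).head? with
  | none => exact ⟨c, by simp⟩
  | some m =>
    by_cases hm : m ≤ c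
    · exact ⟨c, by simp [hm]⟩
    · exact ⟨m, by simp [hm, h]⟩

-- the revved-stack fold equals maxKeep (reversed) followed by what survives of acc
theorem foldl_popS_eq (l : List Char) :
    ∀ (acc : List Char) (m : Char), (maxKeep l).head? = some m →
      l.foldl (fun lst c => c :: popS lst c) acc
        = (maxKeep l).reverse ++ popS acc m := by
  induction l with
  | nil => intro acc m h; simp [maxKeep] at h
  | cons c t ih =>
    intro acc m h
    rw [List.foldl_cons]
    cases t with
    | nil =>
      simp only [maxKeep, List.head?] at h ⊢
      simp at h
      subst h
      simp
    | cons d u =>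
      obtain ⟨mt, hmt⟩ := maxKeep_head_cons d u
      by_cases hc : mt ≤ c
      · have hmk : maxKeep (c :: d :: u) = c :: maxKeep (d :: u) := by
          rw [maxKeep]; rw [hmt]; simp [hc]
        have hm : c = m := by rw [hmk] at h; simpa using h
        subst hm
        rw [ih (c :: popS acc c) mt hmt, hmk]
        have : popS (c :: popS acc c) mt = c :: popS acc c := by
          rw [popS]
          simp [not_lt.mpr hc]
        rw [this]
        simp
      · have hmk : maxKeep (c :: d :: u) = maxKeep (d :: u) := by
          rw [maxKeep]; rw [hmt]; simp [hc]
        have hm : mt = m := by rw [hmk, hmt] at h; simpa using h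
        subst hm
        rw [ih (c :: popS acc c) mt hmt, hmk]
        have hps : popS (c :: popS acc c) mt = popS acc mt := by
          rw [popS]
          have hcm : c < mt := lt_of_not_ge hc
          rw [if_pos hcm]
          exact popS_popS acc c mt (le_of_lt hcm)
        rw [hps]
  
-- A's fold, through the reversal bridge
theorem foldlA_eq (l : List Char) :
    ∀ (acc : List Char),
      l.foldl (fun lst c => popSmaller lst c ++ [c]) acc
        = (l.foldl (fun lst c => c :: popS lst c) acc.reverse).reverse := by
  induction l with
  | nil => intro acc; simp
  | cons c t ih =>
    intro acc
    rw [List.foldl_cons, List.foldl_cons, ih]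
    congr 1
    rw [popSmaller_eq_popS]
    simp

theorem stack_eq_maxKeep (l : List Char) :
    l.foldl (fun lst c => popSmaller lst c ++ [c]) [] = maxKeep l := by
  rw [foldlA_eq]
  cases l with
  | nil => simp [maxKeep]
  | cons c t =>
    obtain ⟨m, hm⟩ := maxKeep_head_cons c t
    rw [List.reverse_nil, foldl_popS_eq (c :: t) [] m hm]
    simp [popS]

-- B's fold over the reversed list computes maxKeep reversed, with the running max in .2
theorem foldlB_eq (l : List Char) :
    l.reverse.foldl
      (fun (acc : List Char × Option Char) c =>
        match acc.2 with
        | none => (acc.1 ++ [c], some c)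
        | some m => if m ≤ c then (acc.1 ++ [c], some c) else acc)
      ([], none)
      = ((maxKeep l).reverse, (maxKeep l).head?) := by
  induction l with
  | nil => simp [maxKeep]
  | cons c t ih =>
    rw [List.reverse_cons, List.foldl_append, ih, List.foldl_cons, List.foldl_nil]
    cases h : (maxKeep t).head? with
    | none =>
      have ht : maxKeep t = [] := List.head?_eq_none_iff.mp h
      simp [maxKeep, ht]
    | some m =>
      by_cases hm : m ≤ c
      · simp [maxKeep, h, hm]
      · simp [maxKeep, h, hm]

-- ===== VERDICT (by name: the statement is the Claim_ definition above) =====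
theorem solution_spec : Claim_equal_solution := by
  intro s _
  unfold Spec_solution solution solution_alt
  rw [stack_eq_maxKeep, foldlB_eq]
  simp
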